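-- pv_equiv track=rewrite | github.com/DailyCodingMem/DailyCoding | jong0717/programmers/lv2/lv2-53_쿼드압축후개수세기.py | quadzip
-- ===== SOURCE A (Python) =====
-- def quadzip(s):
--     n = len(s)
--     if n == 1:
--         return s[0][0]
--     temp = [[] for _ in range(n//2)]
--     for i in range(1,n,2):
--         for j in range(1,n,2):
--             zero = s[i][j][0] + s[i][j-1][0] + s[i-1][j][0] + s[i-1][j-1][0]
--             one = s[i][j][1] + s[i][j-1][1] + s[i-1][j][1] + s[i-1][j-1][1]
--             # 압축
--             if one == 0 :
--                 zero = 1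
--             if zero == 0 :
--                 one = 1
--             temp[i//2].append([zero,one])
--     return quadzip(temp)
-- ===== SOURCE B (Python) =====
-- def quadzip(s):
--     # Top-down quad-tree recursion over the original grid; no intermediate grids are built.
--     def compress(x, y, size):
--         if size == 1:
--             return s[x][y]
--         half = size // 2
--         a = compress(x, y, half)
--         b = compress(x, y + half, half)
--         c = compress(x + half, y, half)
--         d = compress(x + half, y + half, half)
--         zero = a[0] + b[0] + c[0] + d[0]
--         one = a[1] + b[1] + c[1] + d[1]
--         if one == 0:
--             zero = 1
--         if zero == 0:
--             one = 1
--         return [zero, one]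
--     return compress(0, 0, len(s))
-- ===== Notes on version B (the rewrite author's own statement) =====
-- stated objective: alternative
-- what changed: Replaces A's level-by-level rebuilding of ever-smaller grids (recursing on a freshly materialised half-size grid each round) with a single top-down quad-tree recursion compress(x,y,size) over the original grid that splits into four quadrants and combines their [zero,one] counts.
import Mathlib
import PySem

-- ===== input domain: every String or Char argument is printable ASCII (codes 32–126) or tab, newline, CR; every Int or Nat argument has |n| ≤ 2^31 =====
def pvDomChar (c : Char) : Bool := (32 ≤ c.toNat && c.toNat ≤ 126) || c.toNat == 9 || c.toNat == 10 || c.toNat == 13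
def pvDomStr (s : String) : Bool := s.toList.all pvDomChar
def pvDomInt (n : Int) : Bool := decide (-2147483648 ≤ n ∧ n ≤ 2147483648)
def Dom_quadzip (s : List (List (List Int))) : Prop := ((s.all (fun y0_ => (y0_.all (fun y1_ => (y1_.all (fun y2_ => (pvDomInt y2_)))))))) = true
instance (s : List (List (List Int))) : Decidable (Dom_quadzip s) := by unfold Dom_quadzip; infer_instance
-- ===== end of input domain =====

-- B replaces A's level-by-level rebuilding of half-size grids by one top-down quad-tree
-- recursion over the original grid (objective: alternative decomposition, same O(n^2) cost).

-- ===== PORT A =====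
-- Shared total cell/element getters: Python raises (IndexError) where these return the
-- default; Pre_quadzip excludes all such inputs, so the defaults are never observed.
def pvVal (c : List Int) (k : Int) : Int := (PySem.List.pyGet? c k).getD 0
def pvCell (s : List (List (List Int))) (i j : Int) : List Int :=
  ((PySem.List.pyGet? s i).bind (fun r => PySem.List.pyGet? r j)).getD []
-- The two normalization ifs ('if one == 0: zero = 1; if zero == 0: one = 1') appear verbatim
-- in both Python sources; the second if reads the updated zero.
def pvNorm (zero one : Int) : List Int :=
  [if one = 0 then 1 else zero, if (if one = 0 then 1 else zero) = 0 then 1 else one]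
-- body of A's inner loop at odd (i, j): the merged [zero, one] block
def pvBlk (s : List (List (List Int))) (i j : Int) : List Int :=
  pvNorm (pvVal (pvCell s i j) 0 + pvVal (pvCell s i (j-1)) 0 +
          pvVal (pvCell s (i-1) j) 0 + pvVal (pvCell s (i-1) (j-1)) 0)
         (pvVal (pvCell s i j) 1 + pvVal (pvCell s i (j-1)) 1 +
          pvVal (pvCell s (i-1) j) 1 + pvVal (pvCell s (i-1) (j-1)) 1)
-- A's nested loops: 'temp[i//2].append(...)' with i = 1,3,5,… fills rows 0,1,2,… in order,
-- so temp is exactly this row-by-row construction.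
def pvStep (s : List (List (List Int))) : List (List (List Int)) :=
  let n : Int := s.length
  (PySem.List.pyRange 1 n 2).map (fun i => (PySem.List.pyRange 1 n 2).map (fun j => pvBlk s i j))
-- A's recursion totalised by fuel; fuel s.length covers every n ≥ 1 (depth ≤ log2 n + 1);
-- fuel 0 is reached only for n = 0, where Python A hits RecursionError (outside Pre_).
def quadzipAux : Nat → List (List (List Int)) → List Int
  | 0, _ => []
  | f+1, s => if s.length = 1 then pvCell s 0 0 else quadzipAux f (pvStep s)
def quadzip (s : List (List (List Int))) : List Int := quadzipAux s.length s

-- ===== PORT B =====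
-- compress(x, y, size) from Source B, totalised by fuel; fuel s.length suffices for every
-- n ≥ 1 (size halves each level); fuel 0 / size 0 happen only outside Pre_ (Python: RecursionError).
def qcompAux : Nat → List (List (List Int)) → Int → Int → Int → List Int
  | 0, s, x, y, _ => pvCell s x y
  | f+1, s, x, y, size =>
    if size = 1 then pvCell s x y
    else
      let half := PySem.Int.floordiv size 2
      let a := qcompAux f s x y half
      let b := qcompAux f s x (y + half) half
      let c := qcompAux f s (x + half) y half
      let d := qcompAux f s (x + half) (y + half) half
      pvNorm (pvVal a 0 + pvVal b 0 + pvVal c 0 + pvVal d 0)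
             (pvVal a 1 + pvVal b 1 + pvVal c 1 + pvVal d 1)
def quadzip_alt (s : List (List (List Int))) : List Int :=
  qcompAux s.length s 0 0 (s.length : Int)

-- ===== PRECONDITION & SPEC =====
-- Pre_ restricts to the problem's natural quad-tree domain: a grid of side 2^k or 2^k + 1
-- (k ≤ 30; both programs read only the leading 2^k × 2^k square, whose rows must be long
-- enough and whose cells must each hold the [zero, one] pair — so side 2^k + 1 is proved
-- equal too).  On too-short rows/cells inside that square Python A raises IndexError
-- (side 0: RecursionError); on other sides A only returns by silently dropping a trailing
-- row/column at each level — outside the problem's real domain — and B's quadrant split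
-- legitimately combines different blocks there (see the cite).
def Pre_quadzip (s : List (List (List Int))) : Prop :=
  ∃ k ∈ List.range 31,
    (s.length = 2^k ∨ (s.length = 2^k + 1 ∧ 2 ≤ 2^k)) ∧
    (∀ row ∈ s.take (2^k), 2^k ≤ row.length) ∧
    (s.length = 1 ∨ ∀ row ∈ s.take (2^k), ∀ c ∈ row.take (2^k), 2 ≤ c.length)
instance (s : List (List (List Int))) : Decidable (Pre_quadzip s) := by
  unfold Pre_quadzip; infer_instance
def pvWitness_quadzip : List (List (List Int)) :=
  [[[0, 1], [0, 1]], [[0, 1], [1, 0]]]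
def Spec_quadzip (s : List (List (List Int))) (out : List Int) : Prop := out = quadzip_alt s
instance (s : List (List (List Int))) (out : List Int) : Decidable (Spec_quadzip s out) := by
  unfold Spec_quadzip; infer_instance

-- ===== CLAIM (what is proved, stated in full; the proofs are below) =====
def Claim_equal_quadzip : Prop :=
  ∀ (s : List (List (List Int))), Dom_quadzip s → Pre_quadzip s → Spec_quadzip s (quadzip s)

-- ===== LEMMAS AND PROOFS =====

-- the combined quad-tree value: Q s j x y = value of the 2^j-square at top-left (x, y)
def pvQ (s : List (List (List Int))) : Nat → Int → Int → List Int
  | 0, x, y => pvCell s x y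
  | j+1, x, y =>
    pvNorm (pvVal (pvQ s j x y) 0 + pvVal (pvQ s j x (y + 2^j)) 0 +
            pvVal (pvQ s j (x + 2^j) y) 0 + pvVal (pvQ s j (x + 2^j) (y + 2^j)) 0)
           (pvVal (pvQ s j x y) 1 + pvVal (pvQ s j x (y + 2^j)) 1 +
            pvVal (pvQ s j (x + 2^j) y) 1 + pvVal (pvQ s j (x + 2^j) (y + 2^j)) 1)

lemma qcomp_eq_pvQ (j : Nat) : ∀ (f : Nat) (s : List (List (List Int))) (x y : Int),
    j < f → qcompAux f s x y ((2:Int)^j) = pvQ s j x y := by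
  induction j with
  | zero =>
    intro f s x y hf
    obtain ⟨f', rfl⟩ : ∃ f', f = f' + 1 := ⟨f - 1, by omega⟩
    simp [qcompAux, pvQ]
  | succ j ih =>
    intro f s x y hf
    obtain ⟨f', rfl⟩ : ∃ f', f = f' + 1 := ⟨f - 1, by omega⟩
    have h0 : (0:Int) < 2^j := by positivity
    have h2 : (2:Int)^(j+1) = 2*2^j := by ring
    have hne : ((2:Int)^(j+1)) ≠ 1 := by omega
    have hhalf : PySem.Int.floordiv ((2:Int)^(j+1)) 2 = 2^j := by
      rw [PySem.Int.floordiv_eq_ediv_of_pos (by norm_num), pow_succ]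
      exact Int.mul_ediv_cancel _ (by norm_num)
    simp only [qcompAux, if_neg hne, hhalf]
    rw [ih f' s x y (by omega), ih f' s x (y + 2^j) (by omega),
        ih f' s (x + 2^j) y (by omega), ih f' s (x + 2^j) (y + 2^j) (by omega)]
    rfl

lemma pyRange_odd (m : Nat) (b : Int) (hm : 1 ≤ m)
    (hb : b = 2*(m:Int) ∨ b = 2*(m:Int) + 1) :
    PySem.List.pyRange 1 b 2 = (List.range m).map (fun k : Nat => 1 + 2*(k:Int)) := by
  rw [PySem.List.pyRange_of_pos _ _ (by norm_num : (0:Int) < 2)]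
  have h1 : (1:Int) < b := by omega
  rw [if_pos h1]
  have : ((b - 1 + 2 - 1) / 2).toNat = m := by rcases hb with h | h <;> omega
  rw [this]

lemma step_length (s : List (List (List Int))) (m : Nat) (hm : 1 ≤ m)
    (hs : s.length = 2*m ∨ s.length = 2*m + 1) : (pvStep s).length = m := by
  have hc : ((s.length : Int)) = 2*(m:Int) ∨ ((s.length : Int)) = 2*(m:Int) + 1 := by
    rcases hs with h | h <;> [left; right] <;> rw [h] <;> push_cast <;> ring
  simp [pvStep, pyRange_odd m _ hm hc]

lemma step_cell (s : List (List (List Int))) (m x y : Nat)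
    (hs : s.length = 2*m ∨ s.length = 2*m + 1) (hx : x < m) (hy : y < m) :
    pvCell (pvStep s) (x : Int) (y : Int) = pvBlk s (1 + 2*(x:Int)) (1 + 2*(y:Int)) := by
  have hm : 1 ≤ m := by omega
  have hc : ((s.length : Int)) = 2*(m:Int) ∨ ((s.length : Int)) = 2*(m:Int) + 1 := by
    rcases hs with h | h <;> [left; right] <;> rw [h] <;> push_cast <;> ring
  simp [pvStep, pvCell, pyRange_odd m _ hm hc, List.map_map,
        PySem.List.pyGet?_natCast, hx, hy]

lemma blk_eq (s : List (List (List Int))) (i j : Int) :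
    pvBlk s (i+1) (j+1) =
      pvNorm (pvVal (pvCell s i j) 0 + pvVal (pvCell s i (j+1)) 0 +
              pvVal (pvCell s (i+1) j) 0 + pvVal (pvCell s (i+1) (j+1)) 0)
             (pvVal (pvCell s i j) 1 + pvVal (pvCell s i (j+1)) 1 +
              pvVal (pvCell s (i+1) j) 1 + pvVal (pvCell s (i+1) (j+1)) 1) := by
  simp only [pvBlk, add_sub_cancel_right]
  congr 1 <;> ring

lemma pvQ_step (s : List (List (List Int))) (m : Nat)
    (hs : s.length = 2*m ∨ s.length = 2*m + 1) :
    ∀ (j x y : Nat), x + 2^j ≤ m → y + 2^j ≤ m →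
      pvQ (pvStep s) j (x : Int) (y : Int) = pvQ s (j+1) (2*(x:Int)) (2*(y:Int)) := by
  intro j
  induction j with
  | zero =>
    intro x y hx hy
    rw [show pvQ (pvStep s) 0 (x : Int) (y : Int) = pvCell (pvStep s) x y from rfl,
        step_cell s m x y hs (by omega) (by omega),
        show (1 + 2*(x:Int)) = 2*(x:Int) + 1 by ring,
        show (1 + 2*(y:Int)) = 2*(y:Int) + 1 by ring,
        blk_eq s (2*(x:Int)) (2*(y:Int))]
    simp [pvQ]
  | succ j ih =>
    intro x y hx hy
    have h2 : (2:Nat)^(j+1) = 2^j + 2^j := by ring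
    have hp : 1 ≤ (2:Nat)^j := Nat.one_le_two_pow
    have e1 := ih x y (by omega) (by omega)
    have e2 := ih x (y + 2^j) (by omega) (by omega)
    have e3 := ih (x + 2^j) y (by omega) (by omega)
    have e4 := ih (x + 2^j) (y + 2^j) (by omega) (by omega)
    push_cast at e1 e2 e3 e4
    have c1 : ((x:Int) + 2^j) = ((x + 2^j : Nat) : Int) := by push_cast; ring
    have c2 : ((y:Int) + 2^j) = ((y + 2^j : Nat) : Int) := by push_cast; ring
    rw [show pvQ (pvStep s) (j+1) (x : Int) (y : Int) =
          pvNorm (pvVal (pvQ (pvStep s) j x y) 0 +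
                  pvVal (pvQ (pvStep s) j x ((y:Int) + 2^j)) 0 +
                  pvVal (pvQ (pvStep s) j ((x:Int) + 2^j) y) 0 +
                  pvVal (pvQ (pvStep s) j ((x:Int) + 2^j) ((y:Int) + 2^j)) 0)
                 (pvVal (pvQ (pvStep s) j x y) 1 +
                  pvVal (pvQ (pvStep s) j x ((y:Int) + 2^j)) 1 +
                  pvVal (pvQ (pvStep s) j ((x:Int) + 2^j) y) 1 +
                  pvVal (pvQ (pvStep s) j ((x:Int) + 2^j) ((y:Int) + 2^j)) 1) from rfl,
        c1, c2]
    rw [c2] at e2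
    rw [c1] at e3
    rw [c1, c2] at e4
    rw [e1, e2, e3, e4]
    rw [show pvQ s (j+1+1) (2*(x:Int)) (2*(y:Int)) =
          pvNorm (pvVal (pvQ s (j+1) (2*(x:Int)) (2*(y:Int))) 0 +
                  pvVal (pvQ s (j+1) (2*(x:Int)) (2*(y:Int) + 2^(j+1))) 0 +
                  pvVal (pvQ s (j+1) (2*(x:Int) + 2^(j+1)) (2*(y:Int))) 0 +
                  pvVal (pvQ s (j+1) (2*(x:Int) + 2^(j+1)) (2*(y:Int) + 2^(j+1))) 0)
                 (pvVal (pvQ s (j+1) (2*(x:Int)) (2*(y:Int))) 1 +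
                  pvVal (pvQ s (j+1) (2*(x:Int)) (2*(y:Int) + 2^(j+1))) 1 +
                  pvVal (pvQ s (j+1) (2*(x:Int) + 2^(j+1)) (2*(y:Int))) 1 +
                  pvVal (pvQ s (j+1) (2*(x:Int) + 2^(j+1)) (2*(y:Int) + 2^(j+1))) 1) from rfl]
    have d1 : (2*((x + 2^j : Nat):Int)) = 2*(x:Int) + 2^(j+1) := by push_cast; ring
    have d2 : (2*((y + 2^j : Nat):Int)) = 2*(y:Int) + 2^(j+1) := by push_cast; ring
    rw [d1, d2]

lemma A_eq_pvQ (k : Nat) : ∀ (f : Nat) (s : List (List (List Int))),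
    s.length = 2^k → k < f → quadzipAux f s = pvQ s k 0 0 := by
  induction k with
  | zero =>
    intro f s hlen hf
    obtain ⟨f', rfl⟩ : ∃ f', f = f' + 1 := ⟨f - 1, by omega⟩
    simp at hlen
    simp [quadzipAux, hlen, pvQ]
  | succ k ih =>
    intro f s hlen hf
    obtain ⟨f', rfl⟩ : ∃ f', f = f' + 1 := ⟨f - 1, by omega⟩
    have h2 : (2:Nat)^(k+1) = 2*2^k := by ring
    have hne : s.length ≠ 1 := by rw [hlen]; have := Nat.one_lt_two_pow (n := k+1) (by omega); omega
    have hlen' : (pvStep s).length = 2^k :=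
      step_length s (2^k) (Nat.one_le_two_pow) (Or.inl (by omega))
    have := ih f' (pvStep s) hlen' (by omega)
    have hQ := pvQ_step s (2^k) (Or.inl (by omega)) k 0 0 (by omega) (by omega)
    simp only [quadzipAux, hne, if_false]
    rw [this]
    simpa using hQ

lemma A_eq_odd (k : Nat) (s : List (List (List Int)))
    (hlen : s.length = 2^(k+1) + 1) : quadzip s = pvQ s (k+1) 0 0 := by
  have hp : 1 ≤ (2:Nat)^k := Nat.one_le_two_pow
  have hp1 : 1 ≤ (2:Nat)^(k+1) := Nat.one_le_two_pow
  have hne : s.length ≠ 1 := by omega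
  have hs : s.length = 2*2^k ∨ s.length = 2*2^k + 1 := by
    right; rw [hlen, pow_succ]; ring
  have hlen' : (pvStep s).length = 2^k := step_length s (2^k) hp hs
  obtain ⟨f', hf⟩ : ∃ f', s.length = f' + 1 := ⟨s.length - 1, by omega⟩
  have hk : k < f' := by
    have := Nat.lt_two_pow_self (n := k)
    have h2 : (2:Nat)^(k+1) = 2*2^k := by ring
    omega
  unfold quadzip
  rw [hf]
  simp only [quadzipAux]
  rw [if_neg hne, A_eq_pvQ k f' (pvStep s) hlen' hk]
  simpa using pvQ_step s (2^k) hs k 0 0 (by omega) (by omega)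

lemma B_eq_odd (k : Nat) (s : List (List (List Int)))
    (hlen : s.length = 2^(k+1) + 1) : quadzip_alt s = pvQ s (k+1) 0 0 := by
  have hp : 1 ≤ (2:Nat)^k := Nat.one_le_two_pow
  have h2 : (2:Nat)^(k+1) = 2*2^k := by ring
  obtain ⟨f', hf⟩ : ∃ f', s.length = f' + 1 := ⟨s.length - 1, by omega⟩
  have hkf : k < f' := by have := Nat.lt_two_pow_self (n := k); omega
  have hsz : (((f' + 1 : Nat)) : Int) = 2*(2:Int)^k + 1 := by
    rw [← hf, hlen]; push_cast [pow_succ]; ring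
  have h0 : (0:Int) < 2^k := by positivity
  have hne : (((f' + 1 : Nat)) : Int) ≠ 1 := by omega
  have hhalf : PySem.Int.floordiv (((f' + 1 : Nat)) : Int) 2 = 2^k := by
    rw [PySem.Int.floordiv_eq_ediv_of_pos (by norm_num)]; omega
  unfold quadzip_alt
  rw [hf]
  simp only [qcompAux, if_neg hne, hhalf]
  rw [qcomp_eq_pvQ k f' s 0 0 hkf, qcomp_eq_pvQ k f' s 0 (0 + 2^k) hkf,
      qcomp_eq_pvQ k f' s (0 + 2^k) 0 hkf, qcomp_eq_pvQ k f' s (0 + 2^k) (0 + 2^k) hkf]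
  rfl

-- ===== VERDICT (by name: the statement is the Claim_ definition above) =====
theorem quadzip_spec : Claim_equal_quadzip := by
  intro s _ hpre
  obtain ⟨k, hk, hlen, _, _⟩ := hpre
  unfold Spec_quadzip
  rcases hlen with hlen | ⟨hlen, hk2⟩
  · unfold quadzip quadzip_alt
    rw [A_eq_pvQ k s.length s hlen (by rw [hlen]; exact Nat.lt_two_pow_self)]
    have : ((s.length : Int)) = (2:Int)^k := by rw [hlen]; push_cast; ring
    rw [this, qcomp_eq_pvQ k s.length s 0 0 (by rw [hlen]; exact Nat.lt_two_pow_self)]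
  · match k, hlen, hk2 with
    | 0, _, hk2 => exact absurd hk2 (by norm_num)
    | k'+1, hlen, _ =>
      rw [A_eq_odd k' s hlen, B_eq_odd k' s hlen]
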